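-- pv_equiv track=rewrite | github.com/pypi-data/pypi-mirror-403 | packages/omni-cortex/omni_cortex-1.17.3-py3-none-any.whl/omni_cortex/search/keyword.py | _escape_fts_query
-- ===== SOURCE A (Python) =====
-- def _escape_fts_query(query: str) -> str:
--     """Escape special characters for FTS5 query.
--
--     Args:
--         query: Raw search query
--
--     Returns:
--         Escaped FTS5 query
--     """
--     # Remove FTS5 special characters that could cause syntax errors
--     special_chars = ['"', "'", "(", ")", "*", ":", "^", "-", "+"]
--     escaped = query
--     for char in special_chars:
--         escaped = escaped.replace(char, " ")
--
--     # Clean up whitespace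
--     words = escaped.split()
--
--     # Handle empty query
--     if not words:
--         return '""'
--
--     # For simple queries, just use OR matching
--     if len(words) == 1:
--         return f'"{words[0]}"'
--
--     # For multi-word queries, match any word
--     return " OR ".join(f'"{word}"' for word in words)
-- ===== SOURCE B (Python) =====
-- def _escape_fts_query(query: str) -> str:
--     """Tokenize in one explicit pass: split on FTS5 special chars and whitespace, then quote."""
--     seps = {'"', "'", "(", ")", "*", ":", "^", "-", "+"}
--     words = []
--     buf = []
--     for ch in query:
--         if ch in seps or ch.isspace():
--             if buf:
--                 words.append("".join(buf))
--                 buf = []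
--         else:
--             buf.append(ch)
--     if buf:
--         words.append("".join(buf))
--
--     if not words:
--         return '""'
--     if len(words) == 1:
--         return f'"{words[0]}"'
--     return " OR ".join(f'"{word}"' for word in words)
-- ===== Notes on version B (the rewrite author's own statement) =====
-- stated objective: alternative
-- what changed: Replaces A's nine whole-string replace passes followed by split() with a single character-by-character tokenizer that flushes a word buffer at each special/whitespace separator; it trades A's C-level bulk string passes for one explicit scan.
import Mathlib
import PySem

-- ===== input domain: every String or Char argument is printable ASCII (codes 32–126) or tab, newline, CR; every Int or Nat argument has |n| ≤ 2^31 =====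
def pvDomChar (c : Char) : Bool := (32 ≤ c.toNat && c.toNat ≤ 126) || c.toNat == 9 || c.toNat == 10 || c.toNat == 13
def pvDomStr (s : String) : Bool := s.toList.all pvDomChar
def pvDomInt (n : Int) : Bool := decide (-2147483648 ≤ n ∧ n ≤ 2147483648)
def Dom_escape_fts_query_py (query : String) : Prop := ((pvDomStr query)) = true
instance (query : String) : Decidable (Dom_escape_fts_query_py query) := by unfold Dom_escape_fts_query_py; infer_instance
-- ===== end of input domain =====

-- B replaces A's nine whole-string replace passes + split with one explicit single-pass tokenizer (alternative decomposition; same result).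

-- ===== PORT A =====
def escape_fts_query_py (query : String) : String :=
  let special_chars : List String := ["\"", "'", "(", ")", "*", ":", "^", "-", "+"]
  let escaped := special_chars.foldl (fun s ch => PySem.Str.replace s ch " ") query
  let words := PySem.Str.split₀ escaped
  if words.isEmpty then "\"\""
  else if words.length = 1 then "\"" ++ words[0]! ++ "\""
  else PySem.Str.join " OR " (words.map (fun w => "\"" ++ w ++ "\""))

-- ===== PORT B =====
def pvIsSep (c : Char) : Bool :=
  ['"', '\'', '(', ')', '*', ':', '^', '-', '+'].contains c || PySem.Chars.isspace c

def pvTokGo : List Char → List Char → List (List Char) → List (List Char)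
  | [], buf, words => if buf.isEmpty then words else words ++ [buf]
  | c :: rest, buf, words =>
    if pvIsSep c then
      if buf.isEmpty then pvTokGo rest [] words else pvTokGo rest [] (words ++ [buf])
    else pvTokGo rest (buf ++ [c]) words

def escape_fts_query_py_alt (query : String) : String :=
  let words := (pvTokGo query.toList [] []).map String.ofList
  if words.isEmpty then "\"\""
  else if words.length = 1 then "\"" ++ words[0]! ++ "\""
  else PySem.Str.join " OR " (words.map (fun w => "\"" ++ w ++ "\""))

-- ===== PRECONDITION & SPEC =====
def Spec_escape_fts_query_py (query : String) (out : String) : Prop := out = escape_fts_query_py_alt query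
instance (query : String) (out : String) : Decidable (Spec_escape_fts_query_py query out) := by unfold Spec_escape_fts_query_py; infer_instance

-- ===== CLAIM (what is proved, stated in full; the proofs are below) =====
def Claim_equal_escape_fts_query_py : Prop := ∀ (query : String), Dom_escape_fts_query_py query → Spec_escape_fts_query_py query (escape_fts_query_py query)

-- ===== LEMMAS AND PROOFS =====

def pvMask (L : List Char) (c : Char) : Char := if c ∈ L then ' ' else c

def pvS : List Char := ['"', '\'', '(', ')', '*', ':', '^', '-', '+']

lemma pvReplGo_single (a b : Char) :
    ∀ (l : List Char) (acc : List Char) (fuel : Nat), l.length ≤ fuel →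
      PySem.Chars.replace.go [a] [b] fuel l acc
        = acc.reverse ++ l.map (fun c => if c = a then b else c) := by
  intro l
  induction l with
  | nil =>
    intro acc fuel _
    rw [PySem.Chars.replace.go.eq_def]
    cases fuel <;> simp
  | cons c t ih =>
    intro acc fuel h
    cases fuel with
    | zero => simp at h
    | succ f =>
      rw [PySem.Chars.replace.go.eq_def]
      by_cases hc : c = a
      · subst hc
        simp only [List.isPrefixOf, beq_self_eq_true, Bool.true_and, 
          if_pos, List.length_cons, List.length_nil, List.drop_succ_cons, List.drop_zero,
          List.reverse_cons, List.reverse_nil, List.nil_append, List.singleton_append]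
        rw [ih (b :: acc) f (by simpa using h)]
        simp
      · have hpre : ([a].isPrefixOf (c :: t)) = false := by
          simp [List.isPrefixOf]; exact fun h' => (hc h'.symm).elim
        simp only [hpre, Bool.false_eq_true, if_false]
        rw [ih (c :: acc) f (by simpa using h)]
        simp [hc]

lemma pvReplace_single (a b : Char) (cs : List Char) :
    PySem.Chars.replace cs [a] [b] = cs.map (fun c => if c = a then b else c) := by
  rw [PySem.Chars.replace.eq_def]
  simp only [List.isEmpty_cons, Bool.false_eq_true, if_false]
  exact pvReplGo_single a b cs [] cs.length le_rfl

lemma pvStep (s : String) (ch : String) (a : Char) (h : ch.toList = [a]) :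
    (PySem.Str.replace s ch " ").toList = s.toList.map (fun c => if c = a then ' ' else c) := by
  rw [PySem.Str.toList_replace, h, show (" " : String).toList = [' '] from rfl, pvReplace_single]

lemma pvFoldl_mask (L : List Char) (cs : List Char) :
    L.foldl (fun s a => s.map (fun c => if c = a then ' ' else c)) cs = cs.map (pvMask L) := by
  induction L generalizing cs with
  | nil =>
    simp only [List.foldl_nil]
    exact (List.map_congr_left (fun x _ => by simp [pvMask])).symm.trans (List.map_id cs) |>.symm
  | cons a L ih =>
    rw [List.foldl_cons, ih, List.map_map]
    apply List.map_congr_left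
    intro x _
    by_cases hx : x = a <;> by_cases hL : x ∈ L <;> simp [pvMask, Function.comp, hx, hL]

lemma pvIsspace_mask (c : Char) : PySem.Chars.isspace (pvMask pvS c) = pvIsSep c := by
  by_cases h : c ∈ pvS
  · have h1 : pvMask pvS c = ' ' := by simp [pvMask, h]
    rw [h1]
    fin_cases h <;> decide
  · have h1 : pvMask pvS c = c := by simp [pvMask, h]
    have h2 : (['"', '\'', '(', ')', '*', ':', '^', '-', '+'].contains c) = false := by
      rw [Bool.eq_false_iff]
      intro hm
      exact h (by simpa [pvS] using List.contains_iff_mem.mp hm)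
    rw [h1]
    simp only [pvIsSep, h2, Bool.false_or]

lemma pvMask_of_not_sep (c : Char) (h : pvIsSep c = false) : pvMask pvS c = c := by
  have hc : c ∉ pvS := by
    intro hc
    have hm : (['"', '\'', '(', ')', '*', ':', '^', '-', '+'].contains c) = true :=
      List.contains_iff_mem.mpr (by simpa [pvS] using hc)
    simp only [pvIsSep, hm, Bool.true_or] at h
    simp at h
  simp [pvMask, hc]

lemma pvTokGo_append : ∀ (l : List Char) (buf : List Char) (w : List (List Char)),
    pvTokGo l buf w = w ++ pvTokGo l buf [] := by
  intro l
  induction l with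
  | nil => intro buf w; by_cases h : buf.isEmpty <;> simp [pvTokGo, h]
  | cons c rest ih =>
    intro buf w
    by_cases hs : pvIsSep c
    · by_cases hb : buf.isEmpty
      · simp only [pvTokGo, hs, hb, if_true]
        exact ih [] w
      · simp only [pvTokGo, hs, hb, Bool.false_eq_true, if_false, if_true, List.nil_append]
        rw [ih [] (w ++ [buf]), ih [] [buf]]
        simp
    · simp only [pvTokGo, hs, Bool.false_eq_true, if_false]
      exact ih (buf ++ [c]) w

lemma pvSplitGo_eq_tok : ∀ (l : List Char) (cur : List Char) (acc : List (List Char)),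
    PySem.Chars.split₀.go (l.map (pvMask pvS)) cur acc
      = acc.reverse ++ pvTokGo l cur.reverse [] := by
  intro l
  induction l with
  | nil =>
    intro cur acc
    rw [PySem.Chars.split₀.go.eq_def]
    by_cases h : cur.isEmpty
    · simp [pvTokGo, h]
    · have h' : (cur.reverse).isEmpty = false := by simpa using h
      simp [pvTokGo, h, h']
  | cons c rest ih =>
    intro cur acc
    simp only [List.map_cons]
    rw [PySem.Chars.split₀.go.eq_def]
    simp only [pvIsspace_mask c]
    by_cases hs : pvIsSep c
    · by_cases hb : cur.isEmpty
      · have hb' : (cur.reverse).isEmpty = true := by simpa using hb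
        simp only [hs, hb, if_true]
        rw [ih [] acc]
        simp [pvTokGo, hs, hb']
      · have hb' : (cur.reverse).isEmpty = false := by simpa using hb
        simp only [hs, hb, Bool.false_eq_true, if_false, if_true]
        rw [ih [] (cur.reverse :: acc)]
        simp only [List.reverse_cons, List.reverse_nil]
        simp only [pvTokGo, hs, hb', Bool.false_eq_true, if_false, if_true, List.nil_append]
        rw [pvTokGo_append rest [] [cur.reverse]]
        simp [List.append_assoc]
    · simp only [hs, Bool.false_eq_true, if_false, pvMask_of_not_sep c (by simpa using hs)]
      rw [ih (c :: cur) acc]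
      simp [pvTokGo, hs]

lemma pvWords_eq (query : String) :
    PySem.Str.split₀
        ((["\"", "'", "(", ")", "*", ":", "^", "-", "+"] : List String).foldl
          (fun s ch => PySem.Str.replace s ch " ") query)
      = (pvTokGo query.toList [] []).map String.ofList := by
  have hesc : ((["\"", "'", "(", ")", "*", ":", "^", "-", "+"] : List String).foldl
      (fun s ch => PySem.Str.replace s ch " ") query).toList
      = query.toList.map (pvMask pvS) := by
    have hm := pvFoldl_mask pvS query.toList
    simp only [pvS, List.foldl_cons, List.foldl_nil] at hm
    simp only [List.foldl_cons, List.foldl_nil]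
    rw [pvStep _ _ '+' rfl, pvStep _ _ '-' rfl, pvStep _ _ '^' rfl, pvStep _ _ ':' rfl,
        pvStep _ _ '*' rfl, pvStep _ _ ')' rfl, pvStep _ _ '(' rfl, pvStep _ _ '\'' rfl,
        pvStep _ _ '"' rfl]
    exact hm
  rw [PySem.Str.split₀, PySem.Chars.split₀, hesc, pvSplitGo_eq_tok query.toList [] []]
  simp

-- ===== VERDICT (by name: the statement is the Claim_ definition above) =====
theorem escape_fts_query_py_spec : Claim_equal_escape_fts_query_py := by
  intro query _
  unfold Spec_escape_fts_query_py
  simp only [escape_fts_query_py, escape_fts_query_py_alt]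
  rw [pvWords_eq query]
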